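-- pv_equiv track=rewrite | github.com/wagnerluis1982/my-codility-answers | Python/Exercises/E1/LongestPassword.py | solution
-- ===== SOURCE A (Python) =====
-- def solution(S: str):
--     max_password = -1
--     state = ""
--     letters = 0
--     digits = 0
--     for c in S:
--         if c.isspace():
--             if state == "PW" and letters % 2 == 0 and digits % 2 == 1:
--                 max_password = max(max_password, letters + digits)
--             state = "SP"
--             letters = 0
--             digits = 0
--         elif not c.isalnum():
--             state = "BAD"
--         elif state != "BAD":
--             state = "PW"
--
--         if state == "PW":
--             digits += c.isdigit()
--             letters += c.isalpha()
--
--     if state == "PW" and letters % 2 == 0 and digits % 2 == 1: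
--         max_password = max(max_password, letters + digits)
--
--     return max_password
-- ===== SOURCE B (Python) =====
-- def solution(S: str):
--     best = -1
--     for token in S.split():
--         if token.isalnum():
--             letters = sum(c.isalpha() for c in token)
--             digits = sum(c.isdigit() for c in token)
--             if letters % 2 == 0 and digits % 2 == 1:
--                 best = max(best, letters + digits)
--     return best
-- ===== Notes on version B (the rewrite author's own statement) =====
-- stated objective: simpler
-- what changed: Replaced A's four-state per-character state machine (with running letter/digit counters and an end-of-string flush) by tokenizing with S.split() and scoring each fully-alphanumeric token independently.
import Mathlib
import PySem

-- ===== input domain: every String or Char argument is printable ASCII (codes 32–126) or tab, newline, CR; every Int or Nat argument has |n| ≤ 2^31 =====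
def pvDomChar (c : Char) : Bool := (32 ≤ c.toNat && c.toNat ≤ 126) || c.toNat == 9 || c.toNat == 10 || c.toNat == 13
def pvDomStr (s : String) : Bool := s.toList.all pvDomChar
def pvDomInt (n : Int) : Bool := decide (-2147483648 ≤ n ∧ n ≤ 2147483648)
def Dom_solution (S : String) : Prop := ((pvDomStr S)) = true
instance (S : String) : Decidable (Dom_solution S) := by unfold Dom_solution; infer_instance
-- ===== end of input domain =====

-- B replaces A's four-state character state machine by split()-tokenization plus a
-- per-token score; objective: simpler (same O(n) cost).

-- ===== PORT A =====
-- one step of A's for-loop; state = (max_password, state, letters, digits)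
def solutionStep (acc : Int × String × Int × Int) (c : Char) : Int × String × Int × Int :=
  let mp := acc.1; let st := acc.2.1; let l := acc.2.2.1; let d := acc.2.2.2
  let (mp, st, l, d) :=
    if PySem.Chars.isspace c then
      ((if st == "PW" && l % 2 == 0 && d % 2 == 1 then max mp (l + d) else mp), "SP", (0 : Int), (0 : Int))
    else if !(PySem.Chars.isalnum c) then (mp, "BAD", l, d)
    else if st != "BAD" then (mp, "PW", l, d)
    else (mp, st, l, d)
  if st == "PW" then
    (mp, st, l + (if PySem.Chars.isalpha c then 1 else 0), d + (if PySem.Chars.isdigit c then 1 else 0))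
  else (mp, st, l, d)

def solution (S : String) : Int :=
  let r := S.toList.foldl solutionStep (-1, "", (0 : Int), (0 : Int))
  if r.2.1 == "PW" && r.2.2.1 % 2 == 0 && r.2.2.2 % 2 == 1 then max r.1 (r.2.2.1 + r.2.2.2) else r.1

-- ===== PORT B =====
-- B's per-token body: if the token is alnum and letters even / digits odd, take the max
def solutionAltStep (best : Int) (t : List Char) : Int :=
  if PySem.Chars.strIsalnum t then
    let letters : Int := (t.map (fun c => if PySem.Chars.isalpha c then (1 : Int) else 0)).sum
    let digits : Int := (t.map (fun c => if PySem.Chars.isdigit c then (1 : Int) else 0)).sum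
    if letters % 2 == 0 && digits % 2 == 1 then max best (letters + digits) else best
  else best

def solution_alt (S : String) : Int :=
  (PySem.Str.split₀ S).foldl (fun best t => solutionAltStep best t.toList) (-1)

-- ===== PRECONDITION & SPEC =====
def Spec_solution (S : String) (out : Int) : Prop := out = solution_alt S
instance (S : String) (out : Int) : Decidable (Spec_solution S out) := by unfold Spec_solution; infer_instance

-- ===== CLAIM (what is proved, stated in full; the proofs are below) =====
def Claim_equal_solution : Prop := ∀ (S : String), Dom_solution S → Spec_solution S (solution S)

-- ===== LEMMAS AND PROOFS =====

-- direct (non-accumulator-reversing) form of str.split(): tokens of s, with pending token cur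
def pvTok (s : List Char) (cur : List Char) : List (List Char) :=
  match s with
  | [] => if cur = [] then [] else [cur]
  | c :: rest =>
    if PySem.Chars.isspace c then
      (if cur = [] then pvTok rest [] else cur :: pvTok rest [])
    else pvTok rest (cur ++ [c])

theorem pvTok_go (s : List Char) : ∀ cur acc,
    PySem.Chars.split₀.go s cur acc = acc.reverse ++ pvTok s cur.reverse := by
  induction s with
  | nil =>
    intro cur acc
    simp only [PySem.Chars.split₀.go, pvTok]
    by_cases h : cur = []
    · simp [h]
    · simp [h, List.isEmpty_iff]
  | cons c rest ih =>
    intro cur acc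
    simp only [PySem.Chars.split₀.go, pvTok]
    by_cases hs : PySem.Chars.isspace c
    · by_cases h : cur = []
      · simp [hs, h, ih]
      · simp [hs, h, List.isEmpty_iff, ih]
    · simp [hs, ih]

theorem split₀_eq_pvTok (s : List Char) : PySem.Chars.split₀ s = pvTok s [] := by
  simpa using pvTok_go s [] []

-- A's final check, and A's loop + final check started in an arbitrary state
def pvFin (mp : Int) (st : String) (l d : Int) : Int :=
  if st == "PW" && l % 2 == 0 && d % 2 == 1 then max mp (l + d) else mp

def pvRunA (cs : List Char) (mp : Int) (st : String) (l d : Int) : Int :=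
  let r := cs.foldl solutionStep (mp, st, l, d)
  pvFin r.1 r.2.1 r.2.2.1 r.2.2.2

def pvL (t : List Char) : Int := (t.map (fun c => if PySem.Chars.isalpha c then (1 : Int) else 0)).sum
def pvD (t : List Char) : Int := (t.map (fun c => if PySem.Chars.isdigit c then (1 : Int) else 0)).sum

theorem pvL_append (t : List Char) (c : Char) :
    pvL (t ++ [c]) = pvL t + (if PySem.Chars.isalpha c then 1 else 0) := by
  simp [pvL]
theorem pvD_append (t : List Char) (c : Char) :
    pvD (t ++ [c]) = pvD t + (if PySem.Chars.isdigit c then 1 else 0) := by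
  simp [pvD]

theorem pvFin_PW (mp l d : Int) :
    pvFin mp "PW" l d = if l % 2 == 0 && d % 2 == 1 then max mp (l + d) else mp := rfl
theorem pvFin_not (mp l d : Int) (st : String) (h : (st == "PW") = false) :
    pvFin mp st l d = mp := by simp [pvFin, h]

theorem altStep_alnum (best : Int) (t : List Char) (h0 : t ≠ [])
    (h : ∀ c ∈ t, PySem.Chars.isalnum c = true) :
    solutionAltStep best t = if pvL t % 2 == 0 && pvD t % 2 == 1 then max best (pvL t + pvD t) else best := by
  have : PySem.Chars.strIsalnum t = true := by
    simpa [PySem.Chars.strIsalnum, List.isEmpty_iff, h0] using h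
  simp [solutionAltStep, this, pvL, pvD]

theorem altStep_bad (best : Int) (t : List Char) (c : Char) (hc : c ∈ t)
    (h : PySem.Chars.isalnum c = false) : solutionAltStep best t = best := by
  have : PySem.Chars.strIsalnum t = false := by
    simp [PySem.Chars.strIsalnum]
    intro _
    exact ⟨c, hc, by simp [h]⟩
  simp [solutionAltStep, this]

theorem pvMain (cs : List Char) : ∀ (mp l d : Int) (cur : List Char),
    (pvRunA cs mp "" 0 0 = (pvTok cs []).foldl solutionAltStep mp)
    ∧ (pvRunA cs mp "SP" 0 0 = (pvTok cs []).foldl solutionAltStep mp)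
    ∧ (cur ≠ [] → (∀ c ∈ cur, PySem.Chars.isalnum c = true) →
        pvRunA cs mp "PW" (pvL cur) (pvD cur) = (pvTok cs cur).foldl solutionAltStep mp)
    ∧ (cur ≠ [] → (∃ c ∈ cur, PySem.Chars.isalnum c = false) →
        pvRunA cs mp "BAD" l d = (pvTok cs cur).foldl solutionAltStep mp) := by
  induction cs with
  | nil =>
    intro mp l d cur
    refine ⟨by simp [pvRunA, pvFin, pvTok], by simp [pvRunA, pvFin, pvTok], ?_, ?_⟩
    · intro h0 h
      simp [pvRunA, pvFin, pvTok, h0, altStep_alnum mp cur h0 h]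
    · intro h0 h
      obtain ⟨c, hc, hcb⟩ := h
      simp [pvRunA, pvFin, pvTok, h0, altStep_bad mp cur c hc hcb]
  | cons c rest ih =>
    intro mp l d cur
    by_cases hs : PySem.Chars.isspace c = true
    · -- whitespace character
      have stepE : ∀ (mp l d : Int) (st : String),
          solutionStep (mp, st, l, d) c = (pvFin mp st l d, "SP", 0, 0) := by
        intro mp l d st
        simp [solutionStep, hs, pvFin]
      have tokE : cur ≠ [] → pvTok (c :: rest) cur = cur :: pvTok rest [] := by
        intro h0; simp [pvTok, hs, h0]
      refine ⟨?_, ?_, ?_, ?_⟩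
      · rw [show pvTok (c :: rest) [] = pvTok rest [] by simp [pvTok, hs]]
        simp only [pvRunA, List.foldl_cons, stepE, pvFin_not mp 0 0 "" rfl]
        exact (ih mp 0 0 []).2.1
      · rw [show pvTok (c :: rest) [] = pvTok rest [] by simp [pvTok, hs]]
        simp only [pvRunA, List.foldl_cons, stepE, pvFin_not mp 0 0 "SP" rfl]
        exact (ih mp 0 0 []).2.1
      · intro h0 h
        rw [tokE h0, List.foldl_cons, altStep_alnum mp cur h0 h, ← pvFin_PW]
        simp only [pvRunA, List.foldl_cons, stepE]
        exact (ih (pvFin mp "PW" (pvL cur) (pvD cur)) 0 0 []).2.1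
      · intro h0 h
        obtain ⟨cb, hcb, hb⟩ := h
        rw [tokE h0, List.foldl_cons, altStep_bad mp cur cb hcb hb]
        simp only [pvRunA, List.foldl_cons, stepE, pvFin_not mp l d "BAD" rfl]
        exact (ih mp 0 0 []).2.1
    · by_cases ha : PySem.Chars.isalnum c = true
      · -- alnum, non-space
        have stepPW : ∀ (mp l d : Int) (st : String), st ≠ "BAD" →
            solutionStep (mp, st, l, d) c =
              (mp, "PW", l + (if PySem.Chars.isalpha c then 1 else 0),
                d + (if PySem.Chars.isdigit c then 1 else 0)) := by
          intro mp l d st hst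
          simp [solutionStep, hs, ha, hst]
        have hcur1 : ∀ c' ∈ ([c] : List Char), PySem.Chars.isalnum c' = true := by
          intro c' hc'; simp at hc'; simpa [hc'] using ha
        refine ⟨?_, ?_, ?_, ?_⟩
        · simp only [pvRunA, List.foldl_cons, stepPW mp 0 0 "" (by decide), pvTok, hs]
          have := (ih mp 0 0 [c]).2.2.1 (by simp) hcur1
          simpa [pvRunA, pvL, pvD] using this
        · simp only [pvRunA, List.foldl_cons, stepPW mp 0 0 "SP" (by decide), pvTok, hs]
          have := (ih mp 0 0 [c]).2.2.1 (by simp) hcur1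
          simpa [pvRunA, pvL, pvD] using this
        · intro h0 h
          simp only [pvRunA, List.foldl_cons, stepPW mp (pvL cur) (pvD cur) "PW" (by decide),
            pvTok, if_neg hs]
          have hall : ∀ c' ∈ cur ++ [c], PySem.Chars.isalnum c' = true := by
            intro c' hc'
            rcases List.mem_append.1 hc' with h' | h'
            · exact h c' h'
            · simp at h'; simpa [h'] using ha
          have := (ih mp 0 0 (cur ++ [c])).2.2.1 (by simp) hall
          simp only [pvRunA] at this
          rw [← pvL_append, ← pvD_append]
          exact this
        · intro h0 h
          have stepB : solutionStep (mp, "BAD", l, d) c = (mp, "BAD", l, d) := by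
            simp [solutionStep, hs, ha]
          simp only [pvRunA, List.foldl_cons, stepB, pvTok, if_neg hs]
          obtain ⟨cb, hcb, hb⟩ := h
          have := (ih mp l d (cur ++ [c])).2.2.2 (by simp)
            ⟨cb, List.mem_append.2 (Or.inl hcb), hb⟩
          simpa [pvRunA] using this
      · -- non-alnum, non-space: state becomes BAD
        have stepB : ∀ (mp l d : Int) (st : String),
            solutionStep (mp, st, l, d) c = (mp, "BAD", l, d) := by
          intro mp l d st
          simp [solutionStep, hs, ha]
        have hbadmem : ∀ cur : List Char, ∃ cb ∈ cur ++ [c], PySem.Chars.isalnum cb = false := by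
          intro cur
          exact ⟨c, List.mem_append.2 (Or.inr (by simp)), by simpa using ha⟩
        refine ⟨?_, ?_, ?_, ?_⟩
        · simp only [pvRunA, List.foldl_cons, stepB, pvTok, if_neg hs]
          have := (ih mp 0 0 [c]).2.2.2 (by simp) (hbadmem [])
          simpa [pvRunA] using this
        · simp only [pvRunA, List.foldl_cons, stepB, pvTok, if_neg hs]
          have := (ih mp 0 0 [c]).2.2.2 (by simp) (hbadmem [])
          simpa [pvRunA] using this
        · intro h0 h
          simp only [pvRunA, List.foldl_cons, stepB, pvTok, if_neg hs]
          have := (ih mp (pvL cur) (pvD cur) (cur ++ [c])).2.2.2 (by simp) (hbadmem cur)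
          simpa [pvRunA] using this
        · intro h0 h
          simp only [pvRunA, List.foldl_cons, stepB, pvTok, if_neg hs]
          have := (ih mp l d (cur ++ [c])).2.2.2 (by simp) (hbadmem cur)
          simpa [pvRunA] using this

-- ===== VERDICT (by name: the statement is the Claim_ definition above) =====
theorem solution_spec : Claim_equal_solution := by
  intro S _
  unfold Spec_solution
  have hA : solution S = pvRunA S.toList (-1) "" 0 0 := rfl
  have hB : solution_alt S = (pvTok S.toList []).foldl solutionAltStep (-1) := by
    unfold solution_alt
    rw [show (PySem.Str.split₀ S).foldl (fun best t => solutionAltStep best t.toList) (-1)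
          = ((PySem.Str.split₀ S).map String.toList).foldl solutionAltStep (-1) from
        (List.foldl_map).symm,
      PySem.Str.split₀_map_toList, split₀_eq_pvTok]
  rw [hA, hB]
  exact (pvMain S.toList (-1) 0 0 []).1
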